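-- pv_equiv track=rewrite | github.com/Workwrite-Niidome/voynich-manuscript-analysis | archive/scripts/arabic_test.py | parse_eva
-- ===== SOURCE A (Python) =====
-- def parse_eva(word):
--     phonemes = []
--     i = 0
--     while i < len(word):
--         if i+3 <= len(word) and word[i:i+3] in ('cth','ckh','cph','cfh','tsh'):
--             phonemes.append(word[i:i+3])
--             i += 3
--         elif i+2 <= len(word) and word[i:i+2] in ('sh','ch'):
--             phonemes.append(word[i:i+2])
--             i += 2
--         else:
--             phonemes.append(word[i])
--             i += 1
--     return phonemes
-- ===== SOURCE B (Python) =====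
-- TOKENS = {"cth", "ckh", "cph", "cfh", "tsh", "sh", "ch"}
-- # proper prefixes of tokens that some longer token still extends
-- PREFIXES = {"c", "t", "s", "ct", "ck", "cp", "cf", "ts"}
--
-- def _feed(st, ch):
--     """Feed one character to the automaton in state st (the pending token
--     prefix); return (tokens emitted, new state)."""
--     cand = st + ch
--     if cand in TOKENS:
--         return [cand], ""
--     if cand in PREFIXES:
--         return [], cand
--     if st:  # dead end: the first pending char is a token by itself,
--         toks, ns = _feed(st[1:], ch)  # the rest is re-fed to the automaton
--         return [st[0]] + toks, ns
--     return [ch], ""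
--
-- def parse_eva(word):
--     # streaming maximal-munch automaton: one pass, one character at a time
--     out = []
--     st = ""
--     for ch in word:
--         toks, st = _feed(st, ch)
--         out.extend(toks)
--     out.extend(st)  # leftover prefix at end of input: single-char tokens
--     return out
-- ===== Notes on version B (the rewrite author's own statement) =====
-- stated objective: alternative
-- what changed: Replaces A's index loop with 3/2-character lookahead slices by a character-at-a-time maximal-munch automaton: it keeps a pending token prefix, emits a token when the prefix completes, and on a dead end emits the prefix's first character and pushes the remainder back onto the input.
import Mathlib
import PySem

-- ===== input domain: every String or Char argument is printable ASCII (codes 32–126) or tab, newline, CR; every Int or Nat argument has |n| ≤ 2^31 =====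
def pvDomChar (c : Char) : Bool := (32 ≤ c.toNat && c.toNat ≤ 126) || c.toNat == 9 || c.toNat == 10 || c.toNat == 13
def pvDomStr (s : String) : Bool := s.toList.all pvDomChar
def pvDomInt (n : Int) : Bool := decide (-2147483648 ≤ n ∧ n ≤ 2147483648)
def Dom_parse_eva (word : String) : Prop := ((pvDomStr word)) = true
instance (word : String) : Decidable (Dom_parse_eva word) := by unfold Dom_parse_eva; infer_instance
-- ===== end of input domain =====

-- B replaces A's lookahead-slice loop by a character-at-a-time maximal-munch automaton
-- (pending token prefix + pushback on a dead end); same value, alternative algorithm.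

-- ===== PORT A =====
-- A's while-loop over index i is the obvious recursion over the suffix word[i:];
-- word[i:i+3] is the take of that suffix; i += 3/2/1 drops 2/1/0 further chars of rest.
def parse_eva_go : List Char → List (List Char)
  | [] => []
  | c :: rest =>
    if 3 ≤ (c :: rest).length ∧ (c :: rest).take 3 ∈ ([['c','t','h'],['c','k','h'],['c','p','h'],['c','f','h'],['t','s','h']] : List (List Char)) then
      (c :: rest).take 3 :: parse_eva_go (rest.drop 2)
    else if 2 ≤ (c :: rest).length ∧ (c :: rest).take 2 ∈ ([['s','h'],['c','h']] : List (List Char)) then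
      (c :: rest).take 2 :: parse_eva_go (rest.drop 1)
    else
      [c] :: parse_eva_go rest
termination_by cs => cs.length
decreasing_by all_goals (simp [List.length_drop]; try omega)

def parse_eva (word : String) : List String := (parse_eva_go word.toList).map String.ofList

-- ===== PORT B =====
-- TOKENS and PREFIXES of Source B (Python sets of short literal strings; membership is the same)
def evaTokensB : List (List Char) :=
  [['c','t','h'],['c','k','h'],['c','p','h'],['c','f','h'],['t','s','h'],['s','h'],['c','h']]
def evaPrefixesB : List (List Char) :=
  [['c'],['t'],['s'],['c','t'],['c','k'],['c','p'],['c','f'],['t','s']]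

-- _feed(st, ch): one automaton step; recursion on st[1:] is structural recursion on st.
def evaFeed (st : List Char) (ch : Char) : List (List Char) × List Char :=
  let cand := st ++ [ch]
  if cand ∈ evaTokensB then ([cand], [])
  else if cand ∈ evaPrefixesB then ([], cand)
  else
    match st with
    | [] => ([[ch]], [])
    | s0 :: stl => ([s0] :: (evaFeed stl ch).1, (evaFeed stl ch).2)

-- Source B's for-loop over the characters, carrying the state st; out.extend(toks) per step,
-- the final out.extend(st) is the [] case.
def parse_eva_alt_loop (st : List Char) (cs : List Char) : List (List Char) :=
  match cs with
  | [] => st.map (fun c => [c])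
  | c :: rest => (evaFeed st c).1 ++ parse_eva_alt_loop (evaFeed st c).2 rest

def parse_eva_alt (word : String) : List String :=
  (parse_eva_alt_loop [] word.toList).map String.ofList

-- ===== PRECONDITION & SPEC =====
def Spec_parse_eva (word : String) (out : List String) : Prop := out = parse_eva_alt word
instance (word : String) (out : List String) : Decidable (Spec_parse_eva word out) := by unfold Spec_parse_eva; infer_instance

-- ===== CLAIM (what is proved, stated in full; the proofs are below) =====
def Claim_equal_parse_eva : Prop := ∀ (word : String), Dom_parse_eva word → Spec_parse_eva word (parse_eva word)

-- ===== LEMMAS AND PROOFS =====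

-- Invariant: whenever st is [] or a live token prefix, the automaton run on cs from
-- state st computes exactly what A's greedy scanner computes on st ++ cs.
theorem alt_loop_eq_go : ∀ (cs st : List Char),
    (st = [] ∨ st ∈ evaPrefixesB) →
    parse_eva_alt_loop st cs = parse_eva_go (st ++ cs) := by
  intro cs
  induction cs with
  | nil =>
    rintro st (rfl | hst)
    · simp [parse_eva_alt_loop, parse_eva_go]
    · fin_cases hst <;> simp [parse_eva_alt_loop, parse_eva_go]
  | cons c rest ih =>
    have ih0 := ih [] (Or.inl rfl)
    have ihc := ih ['c'] (Or.inr (by decide))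
    have iht := ih ['t'] (Or.inr (by decide))
    have ihs := ih ['s'] (Or.inr (by decide))
    have ihct := ih ['c','t'] (Or.inr (by decide))
    have ihck := ih ['c','k'] (Or.inr (by decide))
    have ihcp := ih ['c','p'] (Or.inr (by decide))
    have ihcf := ih ['c','f'] (Or.inr (by decide))
    have ihts := ih ['t','s'] (Or.inr (by decide))
    rintro st (rfl | hst)
    · -- st = []
      by_cases h1 : c = 'c'
      · simp [parse_eva_alt_loop, evaFeed, evaTokensB, evaPrefixesB, parse_eva_go, *]
      by_cases h2 : c = 't'
      · simp [parse_eva_alt_loop, evaFeed, evaTokensB, evaPrefixesB, parse_eva_go, *]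
      by_cases h3 : c = 's'
      · simp [parse_eva_alt_loop, evaFeed, evaTokensB, evaPrefixesB, parse_eva_go, *]
      simp [parse_eva_alt_loop, evaFeed, evaTokensB, evaPrefixesB, parse_eva_go, *]
    · fin_cases hst
      · -- state case
        by_cases h1 : c = 'h'
        · simp [parse_eva_alt_loop, evaFeed, evaTokensB, evaPrefixesB, parse_eva_go, *]
        by_cases h2 : c = 't'
        · simp [parse_eva_alt_loop, evaFeed, evaTokensB, evaPrefixesB, parse_eva_go, *]
        by_cases h3 : c = 'k'
        · simp [parse_eva_alt_loop, evaFeed, evaTokensB, evaPrefixesB, parse_eva_go, *]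
        by_cases h4 : c = 'p'
        · simp [parse_eva_alt_loop, evaFeed, evaTokensB, evaPrefixesB, parse_eva_go, *]
        by_cases h5 : c = 'f'
        · simp [parse_eva_alt_loop, evaFeed, evaTokensB, evaPrefixesB, parse_eva_go, *]
        by_cases h6 : c = 'c'
        · simp [parse_eva_alt_loop, evaFeed, evaTokensB, evaPrefixesB, parse_eva_go, *]
        by_cases h7 : c = 's'
        · simp [parse_eva_alt_loop, evaFeed, evaTokensB, evaPrefixesB, parse_eva_go, *]
        simp [parse_eva_alt_loop, evaFeed, evaTokensB, evaPrefixesB, parse_eva_go, *]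
      · -- state case
        by_cases h1 : c = 's'
        · simp [parse_eva_alt_loop, evaFeed, evaTokensB, evaPrefixesB, parse_eva_go, *]
        by_cases h2 : c = 'c'
        · simp [parse_eva_alt_loop, evaFeed, evaTokensB, evaPrefixesB, parse_eva_go, *]
        by_cases h3 : c = 't'
        · simp [parse_eva_alt_loop, evaFeed, evaTokensB, evaPrefixesB, parse_eva_go, *]
        simp [parse_eva_alt_loop, evaFeed, evaTokensB, evaPrefixesB, parse_eva_go, *]
      · -- state case
        by_cases h1 : c = 'h'
        · simp [parse_eva_alt_loop, evaFeed, evaTokensB, evaPrefixesB, parse_eva_go, *]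
        by_cases h2 : c = 'c'
        · simp [parse_eva_alt_loop, evaFeed, evaTokensB, evaPrefixesB, parse_eva_go, *]
        by_cases h3 : c = 't'
        · simp [parse_eva_alt_loop, evaFeed, evaTokensB, evaPrefixesB, parse_eva_go, *]
        by_cases h4 : c = 's'
        · simp [parse_eva_alt_loop, evaFeed, evaTokensB, evaPrefixesB, parse_eva_go, *]
        simp [parse_eva_alt_loop, evaFeed, evaTokensB, evaPrefixesB, parse_eva_go, *]
      · -- state case
        by_cases h1 : c = 'h'
        · simp [parse_eva_alt_loop, evaFeed, evaTokensB, evaPrefixesB, parse_eva_go, *]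
        by_cases h2 : c = 's'
        · simp [parse_eva_alt_loop, evaFeed, evaTokensB, evaPrefixesB, parse_eva_go, *]
        by_cases h3 : c = 'c'
        · simp [parse_eva_alt_loop, evaFeed, evaTokensB, evaPrefixesB, parse_eva_go, *]
        by_cases h4 : c = 't'
        · simp [parse_eva_alt_loop, evaFeed, evaTokensB, evaPrefixesB, parse_eva_go, *]
        simp [parse_eva_alt_loop, evaFeed, evaTokensB, evaPrefixesB, parse_eva_go, *]
      · -- state case
        by_cases h1 : c = 'h'
        · simp [parse_eva_alt_loop, evaFeed, evaTokensB, evaPrefixesB, parse_eva_go, *]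
        by_cases h2 : c = 'c'
        · simp [parse_eva_alt_loop, evaFeed, evaTokensB, evaPrefixesB, parse_eva_go, *]
        by_cases h3 : c = 't'
        · simp [parse_eva_alt_loop, evaFeed, evaTokensB, evaPrefixesB, parse_eva_go, *]
        by_cases h4 : c = 's'
        · simp [parse_eva_alt_loop, evaFeed, evaTokensB, evaPrefixesB, parse_eva_go, *]
        simp [parse_eva_alt_loop, evaFeed, evaTokensB, evaPrefixesB, parse_eva_go, *]
      · -- state case
        by_cases h1 : c = 'h'
        · simp [parse_eva_alt_loop, evaFeed, evaTokensB, evaPrefixesB, parse_eva_go, *]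
        by_cases h2 : c = 'c'
        · simp [parse_eva_alt_loop, evaFeed, evaTokensB, evaPrefixesB, parse_eva_go, *]
        by_cases h3 : c = 't'
        · simp [parse_eva_alt_loop, evaFeed, evaTokensB, evaPrefixesB, parse_eva_go, *]
        by_cases h4 : c = 's'
        · simp [parse_eva_alt_loop, evaFeed, evaTokensB, evaPrefixesB, parse_eva_go, *]
        simp [parse_eva_alt_loop, evaFeed, evaTokensB, evaPrefixesB, parse_eva_go, *]
      · -- state case
        by_cases h1 : c = 'h'
        · simp [parse_eva_alt_loop, evaFeed, evaTokensB, evaPrefixesB, parse_eva_go, *]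
        by_cases h2 : c = 'c'
        · simp [parse_eva_alt_loop, evaFeed, evaTokensB, evaPrefixesB, parse_eva_go, *]
        by_cases h3 : c = 't'
        · simp [parse_eva_alt_loop, evaFeed, evaTokensB, evaPrefixesB, parse_eva_go, *]
        by_cases h4 : c = 's'
        · simp [parse_eva_alt_loop, evaFeed, evaTokensB, evaPrefixesB, parse_eva_go, *]
        simp [parse_eva_alt_loop, evaFeed, evaTokensB, evaPrefixesB, parse_eva_go, *]
      · -- state case
        by_cases h1 : c = 'h'
        · simp [parse_eva_alt_loop, evaFeed, evaTokensB, evaPrefixesB, parse_eva_go, *]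
        by_cases h2 : c = 'c'
        · simp [parse_eva_alt_loop, evaFeed, evaTokensB, evaPrefixesB, parse_eva_go, *]
        by_cases h3 : c = 't'
        · simp [parse_eva_alt_loop, evaFeed, evaTokensB, evaPrefixesB, parse_eva_go, *]
        by_cases h4 : c = 's'
        · simp [parse_eva_alt_loop, evaFeed, evaTokensB, evaPrefixesB, parse_eva_go, *]
        simp [parse_eva_alt_loop, evaFeed, evaTokensB, evaPrefixesB, parse_eva_go, *]

-- ===== VERDICT (by name: the statement is the Claim_ definition above) =====
theorem parse_eva_spec : Claim_equal_parse_eva := by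
  intro word _
  unfold Spec_parse_eva parse_eva parse_eva_alt
  exact congrArg (List.map String.ofList) (alt_loop_eq_go word.toList [] (Or.inl rfl)).symm
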